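-- pv_equiv track=rewrite | github.com/erikpeik/adventofcode | 2022/day5/src/readStack.py | readStack
-- ===== SOURCE A (Python) =====
-- def readStack(lines: list):
--     stack = []
--     instructions = []
--     stackRead = 0
--     for line in lines:
--         if line == "":
--             stackRead = 1
--             continue
--         if stackRead == 0:
--             stack.append(line)
--         else:
--             line = line.split(" ")
--             instructions.append(line)
--     length = len(stack)
--     lastLine = stack[length - 1]
--     positions = []
--     for i in range(len(lastLine)):
--         if lastLine[i] == " ":
--             continue
--         positions.append((int(lastLine[i]), i))
--
--     res = {}
--     for i in range(length - 1):
--         line = stack[i]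
--         for pos in positions:
--             if pos[1] < len(line) and line[pos[1]] != " ":
--                 if pos[0] in res:
--                     res[pos[0]].append(line[pos[1]])
--                 else:
--                     res[pos[0]] = [line[pos[1]]]
--     return res, positions, instructions
-- ===== SOURCE B (Python) =====
-- def readStack(lines: list):
--     if "" in lines:
--         cut = lines.index("")
--         stack, rest = lines[:cut], lines[cut + 1:]
--     else:
--         stack, rest = lines, []
--     instructions = [line.split(" ") for line in rest if line != ""]
--     lastLine = stack[-1]
--     posmap = {i: int(ch) for i, ch in enumerate(lastLine) if ch != " "}
--     positions = [(num, i) for i, num in posmap.items()]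
--     res = {}
--     for row in stack[:-1]:
--         for i, ch in enumerate(row):
--             if ch != " " and i in posmap:
--                 res.setdefault(posmap[i], []).append(ch)
--     return res, positions, instructions
-- ===== Notes on version B (the rewrite author's own statement) =====
-- stated objective: alternative
-- what changed: B splits at the first blank line by index/slice instead of a stateful flag loop, builds an index->number dict (posmap) once from the numbering line, and replaces A's inner scan over the positions list with a scan over each row's own characters with a posmap hash lookup, so the row-by-positions nested pass and its bounds check disappear.
import Mathlib
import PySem

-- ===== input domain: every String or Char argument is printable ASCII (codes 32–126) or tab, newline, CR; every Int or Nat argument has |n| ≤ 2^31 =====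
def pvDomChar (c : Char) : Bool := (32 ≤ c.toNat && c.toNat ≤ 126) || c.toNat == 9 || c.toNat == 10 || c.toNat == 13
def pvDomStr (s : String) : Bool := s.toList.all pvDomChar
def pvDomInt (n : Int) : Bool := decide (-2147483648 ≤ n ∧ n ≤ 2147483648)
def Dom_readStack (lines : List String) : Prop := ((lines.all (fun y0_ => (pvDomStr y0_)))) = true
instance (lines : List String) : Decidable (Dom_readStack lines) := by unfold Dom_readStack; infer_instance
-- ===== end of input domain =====

-- B replaces A's stateful classification loop by an index/slice split at the first blank line,
-- builds an index->number dict from the numbering line once, and scans each row's own characters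
-- with a dict lookup instead of A's inner pass over the positions list (objective: alternative).


-- ===== PORT A =====
-- one iteration of A's first loop (state: stack, instructions, stackRead)
def pvAStep (s : List String × List (List String) × Int) (line : String) :
    List String × List (List String) × Int :=
  if line = "" then (s.1, s.2.1, 1)
  else if s.2.2 = 0 then (s.1 ++ [line], s.2.1, s.2.2)
  else (s.1, s.2.1 ++ [(PySem.Str.split? line " ").getD []], s.2.2)

-- one dict-update step of A's res loop: 'if pos[0] in res: res[pos[0]].append(ch) else: res[pos[0]] = [ch]'
def pvAUpd (d : PySem.Dict Int (List String)) (k : Int) (ch : Char) : PySem.Dict Int (List String) :=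
  if d.contains k then d.modify k [] (fun v => v ++ [String.ofList [ch]])
  else d.insert k [String.ofList [ch]]

def readStack (lines : List String) : (List (Int × List String)) × (List (Int × Int)) × List (List String) :=
  let st := lines.foldl pvAStep ([], [], 0)
  let stack := st.1
  let instructions := st.2.1
  let length : Int := PySem.List.len stack
  let lastLine := PySem.List.pyGetD stack (length - 1) ""   -- stack[length-1]; raises outside Pre_
  -- for i in range(len(lastLine)): …
  let positions := (PySem.List.pyRange 0 (PySem.Str.len lastLine) 1).foldl
    (fun (acc : List (Int × Int)) i =>
      let c := PySem.List.pyGetD lastLine.toList i ' '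
      if c = ' ' then acc
      else acc ++ [((PySem.Int.ofChars? [c]).getD 0, i)])   -- int(lastLine[i]); raises outside Pre_
    []
  -- for i in range(length-1): for pos in positions: …
  let res := (PySem.List.pyRange 0 (length - 1) 1).foldl
    (fun (d : PySem.Dict Int (List String)) i =>
      let line := (PySem.List.pyGetD stack i "").toList
      positions.foldl
        (fun d pos =>
          if pos.2 < PySem.List.len line ∧ PySem.List.pyGetD line pos.2 ' ' ≠ ' ' then
            pvAUpd d pos.1 (PySem.List.pyGetD line pos.2 ' ')
          else d)
        d)
    PySem.Dict.empty
  (res.items, positions, instructions)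

-- ===== PORT B =====
-- split at the first blank line: (lines[:cut], lines[cut+1:]), or (lines, []) with no blank line
def pvSplit (lines : List String) : List String × List String :=
  match PySem.List.index? lines "" with
  | some cut => (lines.take cut, lines.drop (cut + 1))
  | none => (lines, [])

def readStack_alt (lines : List String) : (List (Int × List String)) × (List (Int × Int)) × List (List String) :=
  let parts := pvSplit lines
  let stack := parts.1
  let instructions := (parts.2.filter (fun l => l ≠ "")).map (fun line => (PySem.Str.split? line " ").getD [])
  let lastLine := stack.getLast?.getD ""                    -- stack[-1]; raises outside Pre_
  -- posmap = {i: int(ch) for i, ch in enumerate(lastLine) if ch != " "}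
  let posmap := (PySem.List.enumerate lastLine.toList 0).foldl
    (fun (d : PySem.Dict Int Int) p =>
      if p.2 ≠ ' ' then d.insert p.1 ((PySem.Int.ofChars? [p.2]).getD 0) else d)
    PySem.Dict.empty
  -- positions = [(num, i) for i, num in posmap.items()]
  let positions := posmap.items.map (fun q => (q.2, q.1))
  -- for row in stack[:-1]: for i, ch in enumerate(row): if ch != ' ' and i in posmap: …
  let res := stack.dropLast.foldl
    (fun (d : PySem.Dict Int (List String)) row =>
      (PySem.List.enumerate row.toList 0).foldl
        (fun d p =>
          if p.2 ≠ ' ' ∧ posmap.contains p.1 then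
            d.modify (posmap.getD p.1 0) [] (fun v => v ++ [String.ofList [p.2]])
          else d)
        d)
    PySem.Dict.empty
  (res.items, positions, instructions)

-- ===== PRECONDITION & SPEC =====
-- Pre_ excludes exactly the inputs where Python A raises: an input with no line before the first
-- blank line (stack[-1] IndexError) or whose last stack line has a non-space non-digit character
-- (int() ValueError). A returns on every input satisfying Pre_.
def Pre_readStack (lines : List String) : Prop :=
  lines.takeWhile (fun l => l ≠ "") ≠ [] ∧
  (((lines.takeWhile (fun l => l ≠ "")).getLastD "").toList.all
    (fun c => c == ' ' || (decide ('0' ≤ c) && decide (c ≤ '9')))) = true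
instance (lines : List String) : Decidable (Pre_readStack lines) := by unfold Pre_readStack; infer_instance

def pvWitness_readStack : List String := ["[A]", "1", "", "move 1"]

def Spec_readStack (lines : List String) (out : (List (Int × List String)) × (List (Int × Int)) × List (List String)) : Prop := out = readStack_alt lines
instance (lines : List String) (out : (List (Int × List String)) × (List (Int × Int)) × List (List String)) : Decidable (Spec_readStack lines out) := by unfold Spec_readStack; infer_instance

-- ===== CLAIM (what is proved, stated in full; the proofs are below) =====
def Claim_equal_readStack : Prop := ∀ (lines : List String), Dom_readStack lines → Pre_readStack lines → Spec_readStack lines (readStack lines)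

-- ===== LEMMAS AND PROOFS =====

-- the column numbers and the sorted index list J of non-space characters of the numbering line
def pvNumAt (cs : List Char) (j : Int) : Int :=
  (PySem.Int.ofChars? [PySem.List.pyGetD cs j ' ']).getD 0

def pvJ (cs : List Char) : List Int :=
  (PySem.List.pyRange 0 (cs.length : Int) 1).filter
    (fun j => decide (PySem.List.pyGetD cs j ' ' ≠ ' '))

-- the dict the B port builds from the numbering line
def pvPosmap (cs : List Char) : PySem.Dict Int Int :=
  (PySem.List.enumerate cs 0).foldl
    (fun (d : PySem.Dict Int Int) p =>
      if p.2 ≠ ' ' then d.insert p.1 ((PySem.Int.ofChars? [p.2]).getD 0) else d)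
    PySem.Dict.empty

-- A's first loop once stackRead = 1 only collects instructions
theorem pvPhase1_one (ls : List String) : ∀ (stack : List String) (instr : List (List String)),
    ls.foldl pvAStep (stack, instr, 1) =
      (stack, instr ++ (ls.filter (fun l => l ≠ "")).map (fun line => (PySem.Str.split? line " ").getD []), 1) := by
  induction ls with
  | nil => simp
  | cons a t ih =>
    intro stack instr
    by_cases h : a = "" <;> simp [pvAStep, h, ih]

-- pvSplit unfolding rules
theorem pvSplit_cons_blank (t : List String) : pvSplit ("" :: t) = ([], t) := by
  unfold pvSplit
  rw [PySem.List.index?_cons_self]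
  rfl

theorem pvSplit_cons_ne (a : String) (t : List String) (h : a ≠ "") :
    pvSplit (a :: t) = (a :: (pvSplit t).1, (pvSplit t).2) := by
  unfold pvSplit
  rw [PySem.List.index?_cons_of_ne t h]
  cases hi : PySem.List.index? t "" with
  | none => simp
  | some cut => simp

-- A's first loop = pvSplit + filter/map
theorem pvPhase1_zero (ls : List String) : ∀ (stack : List String) (instr : List (List String)),
    ls.foldl pvAStep (stack, instr, 0) =
      (stack ++ (pvSplit ls).1,
       instr ++ ((pvSplit ls).2.filter (fun l => l ≠ "")).map (fun line => (PySem.Str.split? line " ").getD []),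
       if "" ∈ ls then 1 else 0) := by
  induction ls with
  | nil => simp [pvSplit, PySem.List.index?]
  | cons a t ih =>
    intro stack instr
    by_cases h : a = ""
    · subst h
      simp [pvAStep, pvSplit_cons_blank, pvPhase1_one]
    · simp [pvAStep, h, ih, pvSplit_cons_ne a t h, List.append_assoc]

-- stack[len(stack)-1] with default = last element with default
theorem pvLastEq (stack : List String) :
    PySem.List.pyGetD stack (PySem.List.len stack - 1) "" = stack.getLast?.getD "" := by
  cases stack with
  | nil => decide
  | cons a t =>
    have h1 : PySem.List.len (a :: t) - 1 = ((a :: t).length - 1 : Nat) := by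
      simp [PySem.List.len_eq]
    rw [h1, PySem.List.pyGetD_natCast, List.getLast?_eq_getElem?]
    simp [List.getD_eq_getElem?_getD]

-- pvJ is strictly increasing
theorem pvJ_pairwise (cs : List Char) : (pvJ cs).Pairwise (· < ·) := by
  unfold pvJ
  refine List.Pairwise.filter _ ?_
  rw [PySem.List.pyRange_zero_natCast]
  exact List.pairwise_lt_range.map _ (fun a b h => by exact_mod_cast h)

theorem pvJ_nodup (cs : List Char) : (pvJ cs).Nodup :=
  (pvJ_pairwise cs).imp (fun h => ne_of_lt h)

theorem pvJ_mem (cs : List Char) (j : Int) :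
    j ∈ pvJ cs ↔ (0 ≤ j ∧ j < (cs.length : Int)) ∧ PySem.List.pyGetD cs j ' ' ≠ ' ' := by
  simp [pvJ, List.mem_filter, PySem.List.mem_pyRange_one]

-- posmap's items list: the indices of pvJ paired with their column numbers, in order
theorem pvPosmap_items (cs : List Char) :
    (pvPosmap cs).items = (pvJ cs).map (fun j => (j, pvNumAt cs j)) := by
  unfold pvPosmap
  rw [PySem.List.enumerate_eq_map_pyRange cs ' ', List.foldl_map]
  have h : (PySem.List.pyRange 0 (PySem.List.len cs) 1).foldl
      (fun (d : PySem.Dict Int Int) j =>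
        if PySem.List.pyGetD cs j ' ' ≠ ' ' then
          d.insert j ((PySem.Int.ofChars? [PySem.List.pyGetD cs j ' ']).getD 0)
        else d) PySem.Dict.empty
      = (pvJ cs).foldl
        (fun (d : PySem.Dict Int Int) j => d.insert j (pvNumAt cs j)) PySem.Dict.empty := by
    rw [pvJ, ← PySem.List.len_eq, List.foldl_filter]
    refine PySem.List.foldl_congr_mem _ _ _ _ ?_
    intro acc j _
    by_cases h : PySem.List.pyGetD cs j ' ' = ' ' <;> simp [h, pvNumAt]
  rw [h]
  have h2 := PySem.Dict.items_foldl_insert_fresh (pvJ cs) (fun j => j) (pvNumAt cs)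
    PySem.Dict.empty (by intro a _; simp) (by simpa using pvJ_nodup cs)
  simpa using h2

theorem pvPosmap_keys (cs : List Char) : (pvPosmap cs).keys = pvJ cs := by
  simp [PySem.Dict.keys, pvPosmap_items, Function.comp_def]

theorem pvPosmap_contains (cs : List Char) (j : Int) :
    (pvPosmap cs).contains j = decide (j ∈ pvJ cs) := by
  have h : (pvPosmap cs).contains j = true ↔ j ∈ pvJ cs := by
    rw [PySem.Dict.contains_iff_mem_keys, pvPosmap_keys]
  rw [Bool.eq_iff_iff, h, decide_eq_true_eq]

theorem pvPosmap_getD (cs : List Char) (j : Int) (hj : j ∈ pvJ cs) :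
    (pvPosmap cs).getD j 0 = pvNumAt cs j := by
  refine PySem.Dict.getD_of_mem_items _ ?_ ?_ 0
  · rw [pvPosmap_items]; exact List.mem_map_of_mem hj
  · rw [pvPosmap_keys]; exact pvJ_nodup cs

-- A's positions loop = pvJ mapped to (number, index)
theorem pvPositionsA (s : List Char) :
    (PySem.List.pyRange 0 (↑s.length) 1).foldl
      (fun (acc : List (Int × Int)) i =>
        let c := PySem.List.pyGetD s i ' '
        if c = ' ' then acc
        else acc ++ [((PySem.Int.ofChars? [c]).getD 0, i)]) [] =
    (pvJ s).map (fun j => (pvNumAt s j, j)) := by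
  rw [PySem.List.foldl_congr_mem _ _
      (fun acc i => if PySem.List.pyGetD s i ' ' ≠ ' ' then
          acc ++ [(pvNumAt s i, i)] else acc) _
      (by intro acc i _; by_cases h : PySem.List.pyGetD s i ' ' = ' ' <;> simp [h, pvNumAt])]
  rw [PySem.List.foldl_append_ite (fun i => PySem.List.pyGetD s i ' ' ≠ ' ')
      (fun i => (pvNumAt s i, i))]
  simp [pvJ]

-- B's positions comprehension = the same list
theorem pvPositionsB (s : List Char) :
    (pvPosmap s).items.map (fun q => (q.2, q.1)) = (pvJ s).map (fun j => (pvNumAt s j, j)) := by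
  rw [pvPosmap_items, List.map_map]
  rfl

-- index-set exchange: scanning A's position indices restricted to a row
-- = scanning the row's indices restricted to position indices
theorem pvIdxExchange (cs rs : List Char) :
    (pvJ cs).filter (fun j => decide (j < (rs.length : Int) ∧ PySem.List.pyGetD rs j ' ' ≠ ' ')) =
    (PySem.List.pyRange 0 (rs.length : Int) 1).filter
      (fun j => decide (PySem.List.pyGetD rs j ' ' ≠ ' ' ∧ j ∈ pvJ cs)) := by
  have hp1 : ((pvJ cs).filter
      (fun j => decide (j < (rs.length : Int) ∧ PySem.List.pyGetD rs j ' ' ≠ ' '))).Pairwise (· < ·) :=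
    List.Pairwise.filter _ (pvJ_pairwise cs)
  have hp2 : ((PySem.List.pyRange 0 (rs.length : Int) 1).filter
      (fun j => decide (PySem.List.pyGetD rs j ' ' ≠ ' ' ∧ j ∈ pvJ cs))).Pairwise (· < ·) := by
    refine List.Pairwise.filter _ ?_
    rw [PySem.List.pyRange_zero_natCast]
    exact List.pairwise_lt_range.map _ (fun a b h => by exact_mod_cast h)
  refine List.Perm.eq_of_pairwise (fun a b _ _ hab hba => absurd hba (not_lt.mpr hab.le)) hp1 hp2 ?_
  refine (List.perm_ext_iff_of_nodup (hp1.imp ne_of_lt) (hp2.imp ne_of_lt)).mpr ?_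
  intro a
  simp only [List.mem_filter, PySem.List.mem_pyRange_one, decide_eq_true_eq]
  constructor
  · rintro ⟨ha, h1, h2⟩
    exact ⟨⟨((pvJ_mem cs a).mp ha).1.1, h1⟩, h2, ha⟩
  · rintro ⟨⟨_, h1⟩, h2, ha⟩
    exact ⟨ha, h1, h2⟩

-- A's conditional dict update = B's unconditional modify
theorem pvAUpdEq (d : PySem.Dict Int (List String)) (k : Int) (ch : Char) :
    pvAUpd d k ch = d.modify k [] (fun v => v ++ [String.ofList [ch]]) := by
  unfold pvAUpd
  by_cases h : d.contains k
  · simp [h]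
  · rw [if_neg h, PySem.Dict.modify, PySem.Dict.getD_of_not_contains _ _ (by simpa using h)]
    simp

-- inner loops agree on each row
theorem pvInnerEq (cs rs : List Char) (d : PySem.Dict Int (List String)) :
    ((pvJ cs).map (fun j => (pvNumAt cs j, j))).foldl
      (fun d pos =>
        if pos.2 < PySem.List.len rs ∧ PySem.List.pyGetD rs pos.2 ' ' ≠ ' ' then
          pvAUpd d pos.1 (PySem.List.pyGetD rs pos.2 ' ')
        else d) d =
    (PySem.List.enumerate rs 0).foldl
      (fun d p =>
        if p.2 ≠ ' ' ∧ (pvPosmap cs).contains p.1 then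
          d.modify ((pvPosmap cs).getD p.1 0) [] (fun v => v ++ [String.ofList [p.2]])
        else d) d := by
  rw [List.foldl_map]
  rw [PySem.List.foldl_congr_mem _ _
      (fun d j => if decide (j < (rs.length : Int) ∧ PySem.List.pyGetD rs j ' ' ≠ ' ') = true then
          (fun d j => (pvAUpd d (pvNumAt cs j) (PySem.List.pyGetD rs j ' '))) d j else d) _
      (by intro acc j _
          by_cases h : j < (rs.length : Int) ∧ PySem.List.pyGetD rs j ' ' ≠ ' ' <;>
            simp [h, PySem.List.len_eq])]
  rw [← List.foldl_filter, pvIdxExchange cs rs]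
  rw [PySem.List.enumerate_eq_map_pyRange rs ' ', List.foldl_map, ← PySem.List.len_eq]
  rw [PySem.List.foldl_congr_mem (PySem.List.pyRange 0 (PySem.List.len rs) 1) _
      (fun d j => if decide (PySem.List.pyGetD rs j ' ' ≠ ' ' ∧ j ∈ pvJ cs) = true then
          (fun d j => d.modify ((pvPosmap cs).getD j 0) [] (fun v => v ++ [String.ofList [PySem.List.pyGetD rs j ' ']])) d j else d) _
      (by intro acc j _
          by_cases h : PySem.List.pyGetD rs j ' ' = ' ' <;>
            by_cases h2 : j ∈ pvJ cs <;>
            simp [h, h2, pvPosmap_contains])]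
  rw [← List.foldl_filter, PySem.List.len_eq]
  refine PySem.List.foldl_congr_mem _ _ _ _ ?_
  intro acc j hj
  have hjJ : j ∈ pvJ cs := by
    rw [List.mem_filter] at hj
    exact (decide_eq_true_eq.mp hj.2).2
  rw [pvAUpdEq, pvPosmap_getD cs j hjJ]

-- res loops agree
theorem pvResEq (stack : List String) (cs : List Char) :
    (PySem.List.pyRange 0 (PySem.List.len stack - 1) 1).foldl
      (fun (d : PySem.Dict Int (List String)) i =>
        let line := (PySem.List.pyGetD stack i "").toList
        ((pvJ cs).map (fun j => (pvNumAt cs j, j))).foldl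
          (fun d pos =>
            if pos.2 < PySem.List.len line ∧ PySem.List.pyGetD line pos.2 ' ' ≠ ' ' then
              pvAUpd d pos.1 (PySem.List.pyGetD line pos.2 ' ')
            else d)
          d)
      PySem.Dict.empty =
    stack.dropLast.foldl
      (fun (d : PySem.Dict Int (List String)) row =>
        (PySem.List.enumerate row.toList 0).foldl
          (fun d p =>
            if p.2 ≠ ' ' ∧ (pvPosmap cs).contains p.1 then
              d.modify ((pvPosmap cs).getD p.1 0) [] (fun v => v ++ [String.ofList [p.2]])
            else d)
          d)
      PySem.Dict.empty := by
  cases stack with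
  | nil => rfl
  | cons a t =>
    have hlen : PySem.List.len (a :: t) - 1 = ((a :: t).dropLast.length : Int) := by
      simp [PySem.List.len_eq]
    rw [hlen]
    conv_rhs => rw [← PySem.List.map_pyGetD_pyRange_zero (a :: t).dropLast ""]
    rw [List.foldl_map, PySem.List.len_eq]
    refine PySem.List.foldl_congr_mem _ _ _ _ ?_
    intro acc i hi
    rw [PySem.List.mem_pyRange_one] at hi
    have hgd : PySem.List.pyGetD (a :: t) i "" = PySem.List.pyGetD (a :: t).dropLast i "" := by
      have h2 : i.toNat < (a :: t).dropLast.length := by omega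
      rw [PySem.List.pyGetD_eq_getElem _ _ hi.1 (by simp only [List.length_dropLast] at h2 ⊢; omega),
          PySem.List.pyGetD_eq_getElem _ _ hi.1 (by simp only [List.length_dropLast] at h2; omega),
          List.getElem_dropLast]
    rw [← hgd, pvInnerEq cs (PySem.List.pyGetD (a :: t) i "").toList]

-- the two ports agree on every input
theorem pvPortsAgree (lines : List String) : readStack lines = readStack_alt lines := by
  unfold readStack readStack_alt
  simp only [pvPhase1_zero lines [] [], List.nil_append]
  rw [pvLastEq]
  rw [show ∀ s : String, PySem.Str.len s = (↑s.toList.length : Int) from fun s =>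
        PySem.Str.len_eq s]
  rw [pvPositionsA, pvResEq]
  rw [← pvPositionsB]
  rfl

-- ===== VERDICT (by name: the statement is the Claim_ definition above) =====
theorem readStack_spec : Claim_equal_readStack := by
  intro lines _ _
  unfold Spec_readStack
  exact pvPortsAgree lines
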